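-- pv_equiv track=rewrite | github.com/GHMusicalCoder/Code_Challenges | codewars.com/7kyu_B.py | make_valley
-- ===== SOURCE A (Python) =====
-- def make_valley(arr):
--     arr.sort()
--     left, right, middle = [], [], []
--     if len(arr) % 2:
--         middle.append(arr[0])
--         arr = arr[1:]
--     for a in arr:
--         if len(left) < len(right):
--             left.append(a)
--         else:
--             right.append(a)
--     return left[::-1] + middle[:] + right[:]
-- ===== SOURCE B (Python) =====
-- def make_valley(arr):
--     arr.sort()
--     front, back = [], []
--     to_front = True
--     for a in reversed(arr):
--         if to_front:
--             front.append(a)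
--         else:
--             back.append(a)
--         to_front = not to_front
--     back.reverse()
--     return front + back
-- ===== Notes on version B (the rewrite author's own statement) =====
-- stated objective: alternative
-- what changed: A iterates the ascending sorted values, distributing them into left/right lists by comparing their lengths with a separate odd-length middle case, then returns reverse(left)+middle+right; B makes one pass over the sorted values in descending order with a boolean toggle sending each value to a front or back run (no middle case, no length bookkeeping) and returns front + reversed(back).
import Mathlib
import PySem

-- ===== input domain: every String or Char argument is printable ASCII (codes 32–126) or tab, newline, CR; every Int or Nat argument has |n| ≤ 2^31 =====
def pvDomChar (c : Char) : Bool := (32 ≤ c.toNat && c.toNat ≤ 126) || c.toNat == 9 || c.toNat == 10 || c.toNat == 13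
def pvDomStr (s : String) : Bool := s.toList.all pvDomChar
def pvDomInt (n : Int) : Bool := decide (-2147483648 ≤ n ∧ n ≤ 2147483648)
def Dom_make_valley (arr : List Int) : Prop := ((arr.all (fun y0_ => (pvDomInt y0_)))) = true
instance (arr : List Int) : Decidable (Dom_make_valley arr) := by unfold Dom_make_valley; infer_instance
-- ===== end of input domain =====

-- B walks the sorted values in DESCENDING order once, toggling a flag to send each value to the
-- front or the back run of the valley, then reverses the back run — no middle case and no
-- left/right length comparison as in A. Equivalence is about the return value only (both Pythons
-- sort the argument in place, the same side effect).

-- ===== PORT A =====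
def make_valley (arr : List Int) : List Int :=
  let s := PySem.List.sorted arr (fun x => x) false
  let middle := if s.length % 2 = 1 then [PySem.List.pyGetD s 0 0] else []
  let s2 := if s.length % 2 = 1 then PySem.List.slice s (some 1) none else s
  let lr := s2.foldl (fun (lr : List Int × List Int) a =>
      if lr.1.length < lr.2.length then (lr.1 ++ [a], lr.2) else (lr.1, lr.2 ++ [a]))
    ([], [])
  lr.1.reverse ++ middle ++ lr.2

-- ===== PORT B =====
def make_valley_alt (arr : List Int) : List Int :=
  let desc := (PySem.List.sorted arr (fun x => x) false).reverse
  let fb := desc.foldl (fun (st : List Int × List Int × Bool) a =>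
      if st.2.2 then (st.1 ++ [a], st.2.1, !st.2.2) else (st.1, st.2.1 ++ [a], !st.2.2))
    ([], [], true)
  fb.1 ++ fb.2.1.reverse

-- ===== PRECONDITION & SPEC =====
def Spec_make_valley (arr : List Int) (out : List Int) : Prop := out = make_valley_alt arr
instance (arr : List Int) (out : List Int) : Decidable (Spec_make_valley arr out) := by unfold Spec_make_valley; infer_instance

-- ===== CLAIM (what is proved, stated in full; the proofs are below) =====
def Claim_equal_make_valley : Prop := ∀ (arr : List Int), Dom_make_valley arr → Spec_make_valley arr (make_valley arr)

-- ===== LEMMAS AND PROOFS =====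

-- elements at even positions
def evens : List Int → List Int
  | [] => []
  | [x] => [x]
  | x :: _ :: r => x :: evens r

-- elements at odd positions
def odds (xs : List Int) : List Int := evens xs.tail

theorem evens_cons (x : Int) (xs : List Int) : evens (x :: xs) = x :: odds xs := by
  cases xs <;> simp [evens, odds]

theorem odds_cons (x : Int) (xs : List Int) : odds (x :: xs) = evens xs := rfl

theorem evens_odds_append_singleton (ys : List Int) (x : Int) :
    evens (ys ++ [x]) = evens ys ++ (if ys.length % 2 = 0 then [x] else [])
    ∧ odds (ys ++ [x]) = odds ys ++ (if ys.length % 2 = 0 then [] else [x]) := by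
  induction ys with
  | nil => simp [evens, odds]
  | cons y ys ih =>
      obtain ⟨ih1, ih2⟩ := ih
      by_cases h : ys.length % 2 = 0
      · constructor
        · rw [List.cons_append, evens_cons, evens_cons, ih2, if_pos h,
              if_neg (show ¬ (y :: ys).length % 2 = 0 by simp [List.length_cons]; omega)]
          simp
        · rw [List.cons_append, odds_cons, odds_cons, ih1, if_pos h,
              if_neg (show ¬ (y :: ys).length % 2 = 0 by simp [List.length_cons]; omega)]
      · constructor
        · rw [List.cons_append, evens_cons, evens_cons, ih2, if_neg h,
              if_pos (show (y :: ys).length % 2 = 0 by simp [List.length_cons]; omega)]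
          simp
        · rw [List.cons_append, odds_cons, odds_cons, ih1, if_neg h,
              if_pos (show (y :: ys).length % 2 = 0 by simp [List.length_cons]; omega)]

theorem evens_odds_reverse (xs : List Int) :
    evens xs.reverse = (if xs.length % 2 = 0 then odds xs else evens xs).reverse
    ∧ odds xs.reverse = (if xs.length % 2 = 0 then evens xs else odds xs).reverse := by
  induction xs with
  | nil => simp [evens, odds]
  | cons x xs ih =>
      obtain ⟨ih1, ih2⟩ := ih
      have h1 := (evens_odds_append_singleton xs.reverse x).1
      have h2 := (evens_odds_append_singleton xs.reverse x).2
      rw [List.length_reverse] at h1 h2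
      by_cases h : xs.length % 2 = 0
      · rw [if_pos h] at h1 h2 ih1 ih2
        have hc : ¬ (x :: xs).length % 2 = 0 := by simp [List.length_cons]; omega
        constructor
        · rw [List.reverse_cons, h1, ih1, if_neg hc, evens_cons]
          simp
        · rw [List.reverse_cons, h2, ih2, if_neg hc, odds_cons]
          simp
      · rw [if_neg h] at h1 h2 ih1 ih2
        have hc : (x :: xs).length % 2 = 0 := by simp [List.length_cons]; omega
        constructor
        · rw [List.reverse_cons, h1, ih1, if_pos hc, odds_cons]
          simp
        · rw [List.reverse_cons, h2, ih2, if_pos hc, evens_cons]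
          simp

theorem foldLR (xs : List Int) : ∀ (l r : List Int),
    (l.length = r.length →
      xs.foldl (fun (lr : List Int × List Int) a =>
        if lr.1.length < lr.2.length then (lr.1 ++ [a], lr.2) else (lr.1, lr.2 ++ [a])) (l, r)
      = (l ++ odds xs, r ++ evens xs)) ∧
    (l.length + 1 = r.length →
      xs.foldl (fun (lr : List Int × List Int) a =>
        if lr.1.length < lr.2.length then (lr.1 ++ [a], lr.2) else (lr.1, lr.2 ++ [a])) (l, r)
      = (l ++ evens xs, r ++ odds xs)) := by
  induction xs with
  | nil => intro l r; simp [evens, odds]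
  | cons x xs ih =>
      intro l r
      constructor
      · intro h
        rw [List.foldl_cons]
        have hnot : ¬ l.length < r.length := by omega
        simp only [hnot, if_false]
        have := (ih l (r ++ [x])).2 (by simp; omega)
        rw [this, evens_cons, odds_cons]
        simp
      · intro h
        rw [List.foldl_cons]
        have hlt : l.length < r.length := by omega
        simp only [hlt, if_true]
        have := (ih (l ++ [x]) r).1 (by simp; omega)
        rw [this, evens_cons, odds_cons]
        simp

theorem body_eq (s : List Int) :
    ((if s.length % 2 = 1 then PySem.List.slice s (some 1) none else s).foldl
        (fun (lr : List Int × List Int) a =>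
          if lr.1.length < lr.2.length then (lr.1 ++ [a], lr.2) else (lr.1, lr.2 ++ [a]))
        ([], [])).1.reverse
      ++ (if s.length % 2 = 1 then [PySem.List.pyGetD s 0 0] else [])
      ++ ((if s.length % 2 = 1 then PySem.List.slice s (some 1) none else s).foldl
        (fun (lr : List Int × List Int) a =>
          if lr.1.length < lr.2.length then (lr.1 ++ [a], lr.2) else (lr.1, lr.2 ++ [a]))
        ([], [])).2
    = evens s.reverse ++ (odds s.reverse).reverse := by
  obtain ⟨he, ho⟩ := evens_odds_reverse s
  by_cases h : s.length % 2 = 1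
  · rw [if_neg (by omega : ¬ s.length % 2 = 0)] at he ho
    rw [if_pos h, if_pos h, PySem.List.slice_from_one,
        (foldLR s.tail [] []).1 rfl, he, ho]
    cases s with
    | nil => simp at h
    | cons a t => simp [PySem.List.pyGetD_zero_cons, evens_cons, odds_cons, List.tail]
  · rw [if_pos (by omega : s.length % 2 = 0)] at he ho
    rw [if_neg h, if_neg h, (foldLR s [] []).1 rfl, he, ho]
    simp

theorem foldFB (xs : List Int) : ∀ (f b : List Int),
    (xs.foldl (fun (st : List Int × List Int × Bool) a =>
        if st.2.2 then (st.1 ++ [a], st.2.1, !st.2.2) else (st.1, st.2.1 ++ [a], !st.2.2))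
      (f, b, true) = (f ++ evens xs, b ++ odds xs, decide (xs.length % 2 = 0))) ∧
    (xs.foldl (fun (st : List Int × List Int × Bool) a =>
        if st.2.2 then (st.1 ++ [a], st.2.1, !st.2.2) else (st.1, st.2.1 ++ [a], !st.2.2))
      (f, b, false) = (f ++ odds xs, b ++ evens xs, !decide (xs.length % 2 = 0))) := by
  induction xs with
  | nil => intro f b; simp [evens, odds]
  | cons x xs ih =>
      intro f b
      have hpar : decide ((x :: xs).length % 2 = 0) = !decide (xs.length % 2 = 0) := by
        rcases Nat.mod_two_eq_zero_or_one xs.length with h | h <;>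
          simp [List.length_cons, Nat.add_mod, h]
      constructor
      · rw [List.foldl_cons]
        simp only [if_true, Bool.not_true]
        rw [(ih (f ++ [x]) b).2, evens_cons, odds_cons, hpar]
        simp
      · rw [List.foldl_cons]
        simp only [Bool.false_eq_true, Bool.not_false, reduceIte]
        rw [(ih f (b ++ [x])).1, evens_cons, odds_cons, hpar]
        simp

theorem alt_closed (d : List Int) :
    (d.foldl (fun (st : List Int × List Int × Bool) a =>
        if st.2.2 then (st.1 ++ [a], st.2.1, !st.2.2) else (st.1, st.2.1 ++ [a], !st.2.2))
      ([], [], true)).1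
    ++ (d.foldl (fun (st : List Int × List Int × Bool) a =>
        if st.2.2 then (st.1 ++ [a], st.2.1, !st.2.2) else (st.1, st.2.1 ++ [a], !st.2.2))
      ([], [], true)).2.1.reverse
    = evens d ++ (odds d).reverse := by
  rw [(foldFB d [] []).1]
  simp

-- ===== VERDICT (by name: the statement is the Claim_ definition above) =====
theorem make_valley_spec : Claim_equal_make_valley := by
  intro arr _
  unfold Spec_make_valley make_valley make_valley_alt
  exact (body_eq (PySem.List.sorted arr (fun x => x) false)).trans
    (alt_closed (PySem.List.sorted arr (fun x => x) false).reverse).symm
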